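-- pv_equiv track=rewrite | github.com/cmbi/kmad-web | kman_web/services/convert.py | encode_domains
-- ===== SOURCE A (Python) =====
-- def encode_domains(seq, domains, domain_codes):
--     for i, domI in enumerate(domains):
--         start = domI[0]
--         end = domI[1]
--         domainsCode = domain_codes[i]
--         j = 0
--         k = 0
--         while j < end+1 and k < len(seq):
--             if k % 7 == 2 and j >= start:
--                 seq[k] = domainsCode[0]
--                 seq[k+1] = domainsCode[1]
--             elif k % 7 == 0 and seq[k] != "-":
--                 j += 1
--             k += 1
--     return seq
-- ===== SOURCE B (Python) =====
-- # B: precompute the running residue count per 7-column block once, then for each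
-- # domain binary-search the contiguous block range to stamp (counts are nondecreasing).
-- # Like A, mutates seq in place and returns it.
--
-- def _bisect_left(a, x):
--     lo, hi = 0, len(a)
--     while lo < hi:
--         mid = (lo + hi) // 2
--         if a[mid] < x:
--             lo = mid + 1
--         else:
--             hi = mid
--     return lo
--
--
-- def _bisect_right(a, x):
--     lo, hi = 0, len(a)
--     while lo < hi:
--         mid = (lo + hi) // 2
--         if a[mid] <= x:
--             lo = mid + 1
--         else:
--             hi = mid
--     return lo
--
--
-- def encode_domains(seq, domains, domain_codes):
--     n = len(seq)
--     # counts[b] = number of non-gap residues among seq[0], seq[7], ..., seq[7*b],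
--     # for every block b whose code columns 7*b+2, 7*b+3 exist in seq.
--     counts = []
--     c = 0
--     b = 0
--     while 7 * b + 2 < n:
--         if seq[7 * b] != "-":
--             c += 1
--         counts.append(c)
--         b += 1
--     for (start, end), code in zip(domains, domain_codes):
--         lo = _bisect_left(counts, start)
--         hi = _bisect_right(counts, end)
--         for blk in range(lo, hi):
--             seq[7 * blk + 2] = code[0]
--             seq[7 * blk + 3] = code[1]
--     return seq
-- ===== Notes on version B (the rewrite author's own statement) =====
-- stated objective: faster
-- what changed: Instead of re-scanning the whole spaced sequence once per domain while re-counting residues, B precomputes the nondecreasing per-block residue-count array once and binary-searches each domain's contiguous block range, writing only the stamped positions.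
import Mathlib
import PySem

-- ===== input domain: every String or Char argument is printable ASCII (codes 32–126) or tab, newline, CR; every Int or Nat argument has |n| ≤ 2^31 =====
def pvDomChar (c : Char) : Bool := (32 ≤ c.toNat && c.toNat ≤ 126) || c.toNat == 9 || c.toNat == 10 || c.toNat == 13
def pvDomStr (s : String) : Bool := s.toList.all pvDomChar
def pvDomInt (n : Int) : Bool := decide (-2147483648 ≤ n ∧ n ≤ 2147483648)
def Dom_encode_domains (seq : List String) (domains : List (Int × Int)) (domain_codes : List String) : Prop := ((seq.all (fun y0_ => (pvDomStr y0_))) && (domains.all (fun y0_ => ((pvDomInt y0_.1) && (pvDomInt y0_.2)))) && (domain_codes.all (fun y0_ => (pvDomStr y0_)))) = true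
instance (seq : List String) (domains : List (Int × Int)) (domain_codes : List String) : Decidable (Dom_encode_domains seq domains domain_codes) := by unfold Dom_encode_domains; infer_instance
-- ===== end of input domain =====

-- B precomputes the per-block residue-count array once and binary-searches each domain's
-- contiguous block range (objective: faster). Like A, the Python B mutates seq in place and
-- returns it; the equivalence proved here is about the returned value (the mutation is identical).

-- ===== PORT A =====
-- `code[i]` as the 1-character string Python's string indexing yields ("" only off the raising
-- inputs excluded by Pre_)
def pvChr (code : String) (i : Int) : String :=
  match PySem.Str.pyGet? code i with
  | some c => String.ofList [c]
  | none => ""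

-- the `while j < end+1 and k < len(seq)` loop of A, for one domain
def pvLoopA (code : String) (s e : Int) (seq : List String) (j : Int) (k : Nat) : List String :=
  if j < e + 1 ∧ k < seq.length then
    if k % 7 = 2 ∧ s ≤ j then
      pvLoopA code s e ((seq.set k (pvChr code 0)).set (k + 1) (pvChr code 1)) j (k + 1)
    else if k % 7 = 0 ∧ seq.getD k "" ≠ "-" then
      pvLoopA code s e seq (j + 1) (k + 1)
    else
      pvLoopA code s e seq j (k + 1)
  else seq
termination_by seq.length - k
decreasing_by all_goals simp_all [List.length_set]; omega

def encode_domains (seq : List String) (domains : List (Int × Int)) (domain_codes : List String) : List String :=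
  (PySem.List.enumerate domains).foldl
    (fun sq p => pvLoopA (PySem.List.pyGetD domain_codes p.1 "") p.2.1 p.2.2 sq 0 0) seq

-- ===== PORT B =====
-- `code[i]` for B (same Python string-indexing primitive)
def pvChrB (code : String) (i : Int) : String :=
  match PySem.Str.pyGet? code i with
  | some c => String.ofList [c]
  | none => ""

-- the `while 7*b+2 < n` counts-building loop of B
def pvCountsGo (seq : List String) (b : Nat) (c : Int) (acc : List Int) : List Int :=
  if 7 * b + 2 < seq.length then
    let c' := if seq.getD (7 * b) "" ≠ "-" then c + 1 else c
    pvCountsGo seq (b + 1) c' (acc ++ [c'])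
  else acc
termination_by seq.length - 7 * b

-- hand-written _bisect_left of Source B
def pvBisectL (a : List Int) (x : Int) (lo hi : Nat) : Nat :=
  if lo < hi then
    let mid := (lo + hi) / 2
    if a.getD mid 0 < x then pvBisectL a x (mid + 1) hi else pvBisectL a x lo mid
  else lo
termination_by hi - lo
decreasing_by all_goals omega

-- hand-written _bisect_right of Source B
def pvBisectR (a : List Int) (x : Int) (lo hi : Nat) : Nat :=
  if lo < hi then
    let mid := (lo + hi) / 2
    if a.getD mid 0 ≤ x then pvBisectR a x (mid + 1) hi else pvBisectR a x lo mid
  else lo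
termination_by hi - lo
decreasing_by all_goals omega

def encode_domains_alt (seq : List String) (domains : List (Int × Int)) (domain_codes : List String) : List String :=
  let counts := pvCountsGo seq 0 0 []
  (domains.zip domain_codes).foldl
    (fun sq p =>
      let lo := pvBisectL counts p.1.1 0 counts.length
      let hi := pvBisectR counts p.1.2 0 counts.length
      (List.range' lo (hi - lo)).foldl
        (fun sq2 blk => (sq2.set (7 * blk + 2) (pvChrB p.2 0)).set (7 * blk + 3) (pvChrB p.2 1)) sq)
    seq

-- ===== PRECONDITION & SPEC =====
-- number of residues ("-"-free entries) among the block-leading positions 0,7,…,7*(b-1)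
def pvCnt (seq : List String) (b : Nat) : Int :=
  (((List.range b).countP (fun m => decide (seq.getD (7 * m) "" ≠ "-"))) : Int)

-- number of blocks whose code columns 7*b+2, 7*b+3 start inside seq (7*b+2 < len)
def pvNB (n : Nat) : Nat := (n + 4) / 7

-- Pre_ is EXACTLY the set of inputs on which the Python A returns (no input A returns on is
-- excluded): A raises IndexError when domain_codes is shorter than domains, when a domain that
-- actually stamps some block has a code of length < 2, or when a stamped block's second code
-- column 7*b+3 falls just past the end of seq (len % 7 = 3 at the last block).
def Pre_encode_domains (seq : List String) (domains : List (Int × Int)) (domain_codes : List String) : Prop :=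
  domains.length ≤ domain_codes.length ∧
  ∀ i ∈ List.range domains.length,
    ((∃ b ∈ List.range (pvNB seq.length),
        (domains.getD i (0, 0)).1 ≤ pvCnt seq (b + 1) ∧ pvCnt seq (b + 1) ≤ (domains.getD i (0, 0)).2) →
      2 ≤ PySem.Str.len (domain_codes.getD i "")) ∧
    ¬ (seq.length % 7 = 3 ∧
        (domains.getD i (0, 0)).1 ≤ pvCnt seq (pvNB seq.length) ∧
        pvCnt seq (pvNB seq.length) ≤ (domains.getD i (0, 0)).2)
instance (seq : List String) (domains : List (Int × Int)) (domain_codes : List String) : Decidable (Pre_encode_domains seq domains domain_codes) := by unfold Pre_encode_domains; infer_instance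

def pvWitness_encode_domains : List String × (List (Int × Int)) × List String :=
  (["M", "A", "B", "C", "D", "E", "F"], [((1 : Int), (1 : Int))], ["AA"])

def Spec_encode_domains (seq : List String) (domains : List (Int × Int)) (domain_codes : List String) (out : List String) : Prop := out = encode_domains_alt seq domains domain_codes
instance (seq : List String) (domains : List (Int × Int)) (domain_codes : List String) (out : List String) : Decidable (Spec_encode_domains seq domains domain_codes out) := by unfold Spec_encode_domains; infer_instance

-- ===== CLAIM (what is proved, stated in full; the proofs are below) =====
def Claim_equal_encode_domains : Prop := ∀ (seq : List String) (domains : List (Int × Int)) (domain_codes : List String), Dom_encode_domains seq domains domain_codes → Pre_encode_domains seq domains domain_codes → Spec_encode_domains seq domains domain_codes (encode_domains seq domains domain_codes)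

-- ===== LEMMAS AND PROOFS =====

-- stamping one block (the two `seq[...] = code[...]` writes, in A and in B)
def pvWrite (code : String) (sq : List String) (blk : Nat) : List String :=
  (sq.set (7 * blk + 2) (pvChr code 0)).set (7 * blk + 3) (pvChr code 1)

-- what one domain pass does, block by block
def pvSpecA (code : String) (s e : Int) (seq : List String) (b : Nat) : List String :=
  if e + 1 ≤ pvCnt seq b ∨ seq.length ≤ 7 * b then seq
  else
    pvSpecA code s e
      (if 7 * b + 2 < seq.length ∧ s ≤ pvCnt seq (b + 1) ∧ pvCnt seq (b + 1) ≤ e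
       then pvWrite code seq b else seq) (b + 1)
termination_by seq.length - 7 * b
decreasing_by split <;> simp_all [pvWrite] <;> omega

theorem pvCnt_zero (seq : List String) : pvCnt seq 0 = 0 := by simp [pvCnt]

theorem pvCnt_succ (seq : List String) (b : Nat) :
    pvCnt seq (b + 1) = pvCnt seq b + (if seq.getD (7 * b) "" ≠ "-" then 1 else 0) := by
  unfold pvCnt
  rw [List.range_succ, List.countP_append, List.countP_cons]
  by_cases h : seq.getD (7 * b) "" ≠ "-"
  · simp [h]
  · simp at h
    simp [h]

theorem pvCnt_mono (seq : List String) {b b' : Nat} (h : b ≤ b') : pvCnt seq b ≤ pvCnt seq b' := by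
  unfold pvCnt
  have := List.Sublist.countP_le (p := fun m => decide (seq.getD (7 * m) "" ≠ "-"))
    (List.range_sublist.mpr h)
  exact_mod_cast this

theorem pvCnt_set (seq : List String) (k : Nat) (v : String) (hk : k % 7 ≠ 0) (b : Nat) :
    pvCnt (seq.set k v) b = pvCnt seq b := by
  unfold pvCnt
  congr 1
  apply List.countP_congr
  intro m hm
  have h7 : k ≠ 7 * m := by omega
  simp [List.getD, List.getElem?_set_ne h7]

theorem pvWrite_length (code : String) (sq : List String) (blk : Nat) :
    (pvWrite code sq blk).length = sq.length := by simp [pvWrite]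

theorem pvWrite_cnt (code : String) (sq : List String) (blk : Nat) (b : Nat) :
    pvCnt (pvWrite code sq blk) b = pvCnt sq b := by
  unfold pvWrite
  rw [pvCnt_set _ _ _ (by omega), pvCnt_set _ _ _ (by omega)]

theorem pvSpecA_exit (code : String) (s e : Int) (seq : List String) (b : Nat)
    (h : e + 1 ≤ pvCnt seq b ∨ seq.length ≤ 7 * b) : pvSpecA code s e seq b = seq := by
  rw [pvSpecA, if_pos h]

theorem pvLoopA_skip (code : String) (s e : Int) (seq : List String) (j : Int) (hj : j < e + 1)
    (k : Nat) (hk2 : k % 7 ≠ 2) (hk0 : k % 7 ≠ 0) :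
    pvLoopA code s e seq j k = if k < seq.length then pvLoopA code s e seq j (k + 1) else seq := by
  rw [pvLoopA]
  by_cases hkn : k < seq.length
  · simp [hkn, hj, hk2, hk0]
  · simp [hkn]

theorem pvLoopA_tail (code : String) (s e : Int) (seq : List String) (j : Int) (b : Nat)
    (hj : j < e + 1) (hn : 7 * b + 2 < seq.length) :
    pvLoopA code s e seq j (7 * b + 3) =
      if 7 * b + 7 ≤ seq.length then pvLoopA code s e seq j (7 * b + 7) else seq := by
  have e3 : 7 * b + 3 + 1 = 7 * b + 4 := by omega
  have e4 : 7 * b + 4 + 1 = 7 * b + 5 := by omega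
  have e5 : 7 * b + 5 + 1 = 7 * b + 6 := by omega
  have e6 : 7 * b + 6 + 1 = 7 * b + 7 := by omega
  rw [pvLoopA_skip code s e seq j hj (7 * b + 3) (by omega) (by omega), e3]
  by_cases h7 : 7 * b + 7 ≤ seq.length
  · rw [if_pos (by omega), if_pos h7,
        pvLoopA_skip code s e seq j hj (7 * b + 4) (by omega) (by omega), e4, if_pos (by omega),
        pvLoopA_skip code s e seq j hj (7 * b + 5) (by omega) (by omega), e5, if_pos (by omega),
        pvLoopA_skip code s e seq j hj (7 * b + 6) (by omega) (by omega), e6, if_pos (by omega)]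
  · rw [if_neg h7]
    by_cases h3 : 7 * b + 3 < seq.length
    · rw [if_pos h3, pvLoopA_skip code s e seq j hj (7 * b + 4) (by omega) (by omega), e4]
      by_cases h4 : 7 * b + 4 < seq.length
      · rw [if_pos h4, pvLoopA_skip code s e seq j hj (7 * b + 5) (by omega) (by omega), e5]
        by_cases h5 : 7 * b + 5 < seq.length
        · rw [if_pos h5, pvLoopA_skip code s e seq j hj (7 * b + 6) (by omega) (by omega), e6,
              if_neg (by omega)]
        · rw [if_neg h5]
      · rw [if_neg h4]
    · rw [if_neg h3]

-- A's loop, entered at a block boundary, is the block-wise spec.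
theorem pvLoopA_spec_fuel (code : String) (s e : Int) :
    ∀ fuel b seq, seq.length - 7 * b ≤ fuel →
      pvLoopA code s e seq (pvCnt seq b) (7 * b) = pvSpecA code s e seq b := by
  intro fuel
  induction fuel with
  | zero =>
    intro b seq hf
    have hL : seq.length ≤ 7 * b := by omega
    rw [pvLoopA, if_neg (by intro hc; omega), pvSpecA_exit code s e seq b (Or.inr hL)]
  | succ fuel ih =>
    intro b seq hf
    by_cases hex : e + 1 ≤ pvCnt seq b ∨ seq.length ≤ 7 * b
    · rw [pvSpecA_exit code s e seq b hex, pvLoopA]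
      rcases hex with h | h
      · rw [if_neg (by push_neg; intro hc; omega)]
      · rw [if_neg (by push_neg; intro hc; omega)]
    · push_neg at hex
      obtain ⟨hj0, hlen⟩ := hex
      have hj0' : pvCnt seq b < e + 1 := by omega
      set j1 := pvCnt seq (b + 1) with hj1def
      -- step k = 7*b : the residue-count branch
      have step0 : pvLoopA code s e seq (pvCnt seq b) (7 * b) =
          pvLoopA code s e seq j1 (7 * b + 1) := by
        rw [pvLoopA, if_pos ⟨hj0', hlen⟩, if_neg (by intro hc; omega)]
        by_cases hres : seq.getD (7 * b) "" ≠ "-"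
        · rw [if_pos ⟨by omega, hres⟩]
          have hj1v : j1 = pvCnt seq b + 1 := by rw [hj1def, pvCnt_succ, if_pos hres]
          rw [← hj1v]
        · rw [if_neg (by intro hc; exact hres hc.2)]
          have hj1v : j1 = pvCnt seq b := by rw [hj1def, pvCnt_succ, if_neg hres]; omega
          rw [← hj1v]
      rw [step0]
      -- spec side: the written-or-not sequence for block b
      set seq' := (if 7 * b + 2 < seq.length ∧ s ≤ j1 ∧ j1 ≤ e
                   then pvWrite code seq b else seq) with hseq'
      have hspec : pvSpecA code s e seq b = pvSpecA code s e seq' (b + 1) := by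
        rw [pvSpecA, if_neg (by push_neg; exact ⟨by omega, by omega⟩)]
      rw [hspec]
      have hlen' : seq'.length = seq.length := by
        rw [hseq']; split <;> simp [pvWrite_length]
      have hcnt' : ∀ t, pvCnt seq' t = pvCnt seq t := by
        intro t; rw [hseq']; split <;> simp [pvWrite_cnt]
      -- step k = 7*b+1
      by_cases hj1e : j1 < e + 1
      · rw [pvLoopA_skip code s e seq j1 hj1e (7 * b + 1) (by omega) (by omega)]
        by_cases hn1 : 7 * b + 1 < seq.length
        · rw [if_pos hn1]
          have e1 : 7 * b + 1 + 1 = 7 * b + 2 := by omega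
          rw [e1, pvLoopA]
          by_cases hn2 : 7 * b + 2 < seq.length
          · -- the write column is inside seq
            have tail : pvLoopA code s e seq' j1 (7 * b + 3) = pvSpecA code s e seq' (b + 1) := by
              rw [pvLoopA_tail code s e seq' j1 b hj1e (by rw [hlen']; exact hn2)]
              by_cases h7 : 7 * b + 7 ≤ seq.length
              · rw [if_pos (by rw [hlen']; exact h7)]
                have e7 : 7 * b + 7 = 7 * (b + 1) := by omega
                have hj1' : j1 = pvCnt seq' (b + 1) := by rw [hcnt']
                rw [e7, hj1', ih (b + 1) seq' (by rw [hlen']; omega)]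
              · rw [if_neg (by rw [hlen']; omega),
                    pvSpecA_exit code s e seq' (b + 1) (Or.inr (by rw [hlen']; omega))]
            rw [if_pos ⟨hj1e, hn2⟩]
            have e2 : 7 * b + 2 + 1 = 7 * b + 3 := by omega
            by_cases hsj : s ≤ j1
            · rw [if_pos ⟨by omega, hsj⟩]
              have hw : seq' = pvWrite code seq b := by
                rw [hseq', if_pos ⟨hn2, hsj, by omega⟩]
              rw [e2]
              rw [show (seq.set (7 * b + 2) (pvChr code 0)).set (7 * b + 3) (pvChr code 1) = seq'
                    from by rw [hw]; rfl]
              exact tail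
            · rw [if_neg (by intro hc; exact hsj hc.2), if_neg (by intro hc; omega), e2]
              have hw : seq' = seq := by
                rw [hseq', if_neg (by intro hc; exact hsj hc.2.1)]
              rw [hw] at tail ⊢
              exact tail
          · -- exit at 7*b+2: no write, spec exits on length
            rw [if_neg (by intro hc; exact hn2 hc.2)]
            have hw : seq' = seq := by rw [hseq', if_neg (by intro hc; exact hn2 hc.1)]
            rw [hw, pvSpecA_exit code s e seq (b + 1) (Or.inr (by omega))]
        · -- exit at 7*b+1 : length ran out
          rw [if_neg hn1]
          have hw : seq' = seq := by rw [hseq', if_neg (by intro hc; omega)]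
          rw [hw, pvSpecA_exit code s e seq (b + 1) (Or.inr (by omega))]
      · -- exit at 7*b+1 : j1 ≥ e+1; no write, spec exits on count
        rw [pvLoopA, if_neg (by intro hc; exact hj1e hc.1)]
        have hw : seq' = seq := by rw [hseq', if_neg (by intro hc; omega)]
        rw [hw, pvSpecA_exit code s e seq (b + 1) (Or.inl (by rw [← hj1def]; omega))]

-- the block-wise spec is a fold of stamps over the qualifying blocks (condition on the
-- residue counts of the sequence the pass starts from)
theorem pvSpecA_eq_fuel (code : String) (s e : Int) :
    ∀ fuel b seq, seq.length - 7 * b ≤ fuel →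
      pvSpecA code s e seq b
        = ((List.range' b (pvNB seq.length - b)).filter
            (fun m => decide (s ≤ pvCnt seq (m + 1)) && decide (pvCnt seq (m + 1) ≤ e))).foldl
            (pvWrite code) seq := by
  intro fuel
  induction fuel with
  | zero =>
    intro b seq hf
    have hL : seq.length ≤ 7 * b := by omega
    have hNB : pvNB seq.length - b = 0 := by unfold pvNB; omega
    rw [pvSpecA_exit code s e seq b (Or.inr hL), hNB]
    simp
  | succ fuel ih =>
    intro b seq hf
    by_cases hex1 : e + 1 ≤ pvCnt seq b
    · rw [pvSpecA_exit code s e seq b (Or.inl hex1)]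
      have hnil : (List.range' b (pvNB seq.length - b)).filter
          (fun m => decide (s ≤ pvCnt seq (m + 1)) && decide (pvCnt seq (m + 1) ≤ e)) = [] := by
        rw [List.filter_eq_nil_iff]
        intro m hm
        have hbm : b ≤ m := (List.mem_range'_1.mp hm).1
        have hmono := pvCnt_mono seq (show b ≤ m + 1 by omega)
        simp only [Bool.and_eq_true, decide_eq_true_eq, not_and]
        intro _; omega
      rw [hnil]
      rfl
    · by_cases hex2 : seq.length ≤ 7 * b
      · have hNB : pvNB seq.length - b = 0 := by unfold pvNB; omega
        rw [pvSpecA_exit code s e seq b (Or.inr hex2), hNB]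
        simp
      · rw [pvSpecA, if_neg (by push_neg; exact ⟨by omega, by omega⟩)]
        set seq' := (if 7 * b + 2 < seq.length ∧ s ≤ pvCnt seq (b + 1) ∧ pvCnt seq (b + 1) ≤ e
                     then pvWrite code seq b else seq) with hseq'
        have hlen' : seq'.length = seq.length := by
          rw [hseq']; split <;> simp [pvWrite_length]
        have hcnt' : ∀ t, pvCnt seq' t = pvCnt seq t := by
          intro t; rw [hseq']; split <;> simp [pvWrite_cnt]
        rw [ih (b + 1) seq' (by rw [hlen']; omega), hlen']
        have hpred : (fun m => decide (s ≤ pvCnt seq' (m + 1)) && decide (pvCnt seq' (m + 1) ≤ e))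
            = (fun m => decide (s ≤ pvCnt seq (m + 1)) && decide (pvCnt seq (m + 1) ≤ e)) := by
          funext m; rw [hcnt']
        rw [hpred]
        by_cases hb : b < pvNB seq.length
        · have h2b : 7 * b + 2 < seq.length := by unfold pvNB at hb; omega
          rw [show List.range' b (pvNB seq.length - b)
                = b :: List.range' (b + 1) (pvNB seq.length - (b + 1)) from by
              rw [show pvNB seq.length - b = (pvNB seq.length - (b + 1)) + 1 by omega,
                  List.range'_succ],
              List.filter_cons]
          by_cases hcond : s ≤ pvCnt seq (b + 1) ∧ pvCnt seq (b + 1) ≤ e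
          · rw [if_pos (by simp [hcond.1, hcond.2])]
            rw [List.foldl_cons]
            rw [hseq', if_pos ⟨h2b, hcond.1, hcond.2⟩]
          · rw [if_neg (by simp only [Bool.and_eq_true, decide_eq_true_eq]; exact hcond)]
            rw [hseq', if_neg (by intro hc; exact hcond ⟨hc.2.1, hc.2.2⟩)]
        · have h0 : pvNB seq.length - b = 0 := by omega
          have h1 : pvNB seq.length - (b + 1) = 0 := by omega
          rw [h0, h1]
          simp only [List.range'_zero, List.filter_nil, List.foldl_nil]
          rw [hseq', if_neg (by intro hc; unfold pvNB at hb; omega)]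

-- the counts array B builds: residue counts of blocks 0 … pvNB-1
theorem pvCountsGo_fuel (seq : List String) :
    ∀ fuel b acc, seq.length - 7 * b ≤ fuel →
      pvCountsGo seq b (pvCnt seq b) acc
        = acc ++ (List.range' b (pvNB seq.length - b)).map (fun m => pvCnt seq (m + 1)) := by
  intro fuel
  induction fuel with
  | zero =>
    intro b acc hf
    rw [pvCountsGo, if_neg (by omega), show pvNB seq.length - b = 0 from by unfold pvNB; omega]
    simp
  | succ fuel ih =>
    intro b acc hf
    rw [pvCountsGo]
    by_cases h2 : 7 * b + 2 < seq.length
    · rw [if_pos h2]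
      dsimp only
      have hc' : (if seq.getD (7 * b) "" ≠ "-" then pvCnt seq b + 1 else pvCnt seq b)
          = pvCnt seq (b + 1) := by
        rw [pvCnt_succ]; split_ifs <;> omega
      rw [hc', ih (b + 1) (acc ++ [pvCnt seq (b + 1)]) (by omega)]
      rw [show pvNB seq.length - b = (pvNB seq.length - (b + 1)) + 1 from by unfold pvNB; omega,
          List.range'_succ]
      simp
    · rw [if_neg h2, show pvNB seq.length - b = 0 from by unfold pvNB; omega]
      simp

theorem pvCountsGo_eq (seq : List String) :
    pvCountsGo seq 0 0 [] = (List.range (pvNB seq.length)).map (fun m => pvCnt seq (m + 1)) := by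
  have h := pvCountsGo_fuel seq seq.length 0 [] (by omega)
  rw [pvCnt_zero] at h
  simpa [List.range_eq_range'] using h

theorem pv_pairwise_getD_le (a : List Int) (hs : a.Pairwise (· ≤ ·)) :
    ∀ i j, i ≤ j → j < a.length → a.getD i 0 ≤ a.getD j 0 := by
  intro i j hij hj
  rcases Nat.eq_or_lt_of_le hij with rfl | h
  · exact le_refl _
  · have h2 := List.pairwise_iff_getElem.mp hs i j (by omega) hj h
    rwa [List.getD_eq_getElem a 0 (by omega), List.getD_eq_getElem a 0 hj]

theorem pvBisectL_go (a : List Int) (x : Int) (hs : a.Pairwise (· ≤ ·)) :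
    ∀ fuel lo hi, lo ≤ hi → hi - lo ≤ fuel → hi ≤ a.length →
      (∀ i, i < lo → a.getD i 0 < x) → (∀ i, hi ≤ i → i < a.length → x ≤ a.getD i 0) →
      lo ≤ pvBisectL a x lo hi ∧ pvBisectL a x lo hi ≤ hi ∧
      (∀ i, i < pvBisectL a x lo hi → a.getD i 0 < x) ∧
      (∀ i, pvBisectL a x lo hi ≤ i → i < a.length → x ≤ a.getD i 0) := by
  intro fuel
  induction fuel with
  | zero =>
    intro lo hi hlh0 h1 h2 hlo hhi
    rw [pvBisectL, if_neg (by omega)]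
    exact ⟨le_refl _, by omega, hlo, fun i h1i h2i => hhi i (by omega) h2i⟩
  | succ fuel ih =>
    intro lo hi hlh0 h1 h2 hlo hhi
    by_cases hlh : lo < hi
    · rw [pvBisectL, if_pos hlh]
      dsimp only
      by_cases hcmp : a.getD ((lo + hi) / 2) 0 < x
      · rw [if_pos hcmp]
        have hlo' : ∀ i, i < (lo + hi) / 2 + 1 → a.getD i 0 < x := by
          intro i hi2
          have := pv_pairwise_getD_le a hs i ((lo + hi) / 2) (by omega) (by omega)
          omega
        obtain ⟨ha, hb, hc, hd⟩ := ih ((lo + hi) / 2 + 1) hi (by omega) (by omega) h2 hlo' hhi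
        exact ⟨by omega, hb, hc, hd⟩
      · rw [if_neg hcmp]
        have hhi' : ∀ i, (lo + hi) / 2 ≤ i → i < a.length → x ≤ a.getD i 0 := by
          intro i h1i h2i
          have := pv_pairwise_getD_le a hs ((lo + hi) / 2) i h1i h2i
          omega
        obtain ⟨ha, hb, hc, hd⟩ := ih lo ((lo + hi) / 2) (by omega) (by omega) (by omega) hlo hhi'
        exact ⟨ha, by omega, hc, hd⟩
    · rw [pvBisectL, if_neg hlh]
      exact ⟨le_refl _, by omega, hlo, fun i h1i h2i => hhi i (by omega) h2i⟩

theorem pvBisectR_go (a : List Int) (x : Int) (hs : a.Pairwise (· ≤ ·)) :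
    ∀ fuel lo hi, lo ≤ hi → hi - lo ≤ fuel → hi ≤ a.length →
      (∀ i, i < lo → a.getD i 0 ≤ x) → (∀ i, hi ≤ i → i < a.length → x < a.getD i 0) →
      lo ≤ pvBisectR a x lo hi ∧ pvBisectR a x lo hi ≤ hi ∧
      (∀ i, i < pvBisectR a x lo hi → a.getD i 0 ≤ x) ∧
      (∀ i, pvBisectR a x lo hi ≤ i → i < a.length → x < a.getD i 0) := by
  intro fuel
  induction fuel with
  | zero =>
    intro lo hi hlh0 h1 h2 hlo hhi
    rw [pvBisectR, if_neg (by omega)]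
    exact ⟨le_refl _, by omega, hlo, fun i h1i h2i => hhi i (by omega) h2i⟩
  | succ fuel ih =>
    intro lo hi hlh0 h1 h2 hlo hhi
    by_cases hlh : lo < hi
    · rw [pvBisectR, if_pos hlh]
      dsimp only
      by_cases hcmp : a.getD ((lo + hi) / 2) 0 ≤ x
      · rw [if_pos hcmp]
        have hlo' : ∀ i, i < (lo + hi) / 2 + 1 → a.getD i 0 ≤ x := by
          intro i hi2
          have := pv_pairwise_getD_le a hs i ((lo + hi) / 2) (by omega) (by omega)
          omega
        obtain ⟨ha, hb, hc, hd⟩ := ih ((lo + hi) / 2 + 1) hi (by omega) (by omega) h2 hlo' hhi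
        exact ⟨by omega, hb, hc, hd⟩
      · rw [if_neg hcmp]
        have hhi' : ∀ i, (lo + hi) / 2 ≤ i → i < a.length → x < a.getD i 0 := by
          intro i h1i h2i
          have := pv_pairwise_getD_le a hs ((lo + hi) / 2) i h1i h2i
          omega
        obtain ⟨ha, hb, hc, hd⟩ := ih lo ((lo + hi) / 2) (by omega) (by omega) (by omega) hlo hhi'
        exact ⟨ha, by omega, hc, hd⟩
    · rw [pvBisectR, if_neg hlh]
      exact ⟨le_refl _, by omega, hlo, fun i h1i h2i => hhi i (by omega) h2i⟩

-- a filter of range by an interval condition is the interval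
theorem pv_filter_range_interval (p : Nat → Bool) :
    ∀ (N : Nat), ∀ (lo hi : Nat), hi ≤ N → (∀ m, m < N → (p m = true ↔ (lo ≤ m ∧ m < hi))) →
    (List.range N).filter p = List.range' lo (hi - lo) := by
  intro N
  induction N with
  | zero =>
    intro lo hi h1 h2
    interval_cases hi
    simp
  | succ N ih =>
    intro lo hi h1 h2
    rw [List.range_succ, List.filter_append]
    by_cases hh : hi ≤ N
    · have hN : ¬ p N = true := by rw [h2 N (by omega)]; omega
      rw [ih lo hi hh (fun m hm => h2 m (by omega))]
      simp [hN]
    · have hhi : hi = N + 1 := by omega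
      subst hhi
      by_cases hlo : lo ≤ N
      · have hN : p N = true := (h2 N (by omega)).mpr ⟨hlo, by omega⟩
        have hrest : (List.range N).filter p = List.range' lo (N - lo) := by
          apply ih lo N (le_refl N)
          intro m hm
          rw [h2 m (by omega)]
          exact ⟨fun h => ⟨h.1, hm⟩, fun h => ⟨h.1, by omega⟩⟩
        rw [hrest]
        simp only [List.filter_cons, hN, if_true, List.filter_nil]
        rw [show N + 1 - lo = (N - lo) + 1 by omega, List.range'_1_concat,
            show lo + (N - lo) = N by omega]
      · have hN : ¬ p N = true := by rw [h2 N (by omega)]; omega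
        have hrest : (List.range N).filter p = List.range' lo (0 - lo) := by
          apply ih lo 0 (by omega)
          intro m hm
          rw [h2 m (by omega)]
          omega
        rw [hrest, Nat.zero_sub]
        simp only [List.filter_cons, hN, List.filter_nil, List.range'_zero]
        rw [show (N + 1 : Nat) - lo = 0 by omega, List.range'_zero]
        simp

-- one domain pass of B, as a function of the (precomputed) counts array
def pvStamp (counts : List Int) (sq : List String) (p : (Int × Int) × String) : List String :=
  (List.range' (pvBisectL counts p.1.1 0 counts.length)
     (pvBisectR counts p.1.2 0 counts.length - pvBisectL counts p.1.1 0 counts.length)).foldl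
    (pvWrite p.2) sq

theorem pv_foldl_write_length (code : String) :
    ∀ (l : List Nat) (sq : List String), (l.foldl (pvWrite code) sq).length = sq.length := by
  intro l
  induction l with
  | nil => intro sq; rfl
  | cons b l ih => intro sq; rw [List.foldl_cons, ih, pvWrite_length]

theorem pv_foldl_write_cnt (code : String) :
    ∀ (l : List Nat) (sq : List String) (t : Nat),
      pvCnt (l.foldl (pvWrite code) sq) t = pvCnt sq t := by
  intro l
  induction l with
  | nil => intro sq t; rfl
  | cons b l ih => intro sq t; rw [List.foldl_cons, ih, pvWrite_cnt]

-- A's one-domain pass equals B's one-domain stamp, on any sequence with the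
-- residue counts (and length) of the original seq0
theorem pv_perDomain (seq0 seq : List String) (code : String) (s e : Int)
    (hlen : seq.length = seq0.length) (hcnt : ∀ t, pvCnt seq t = pvCnt seq0 t) :
    pvLoopA code s e seq 0 0
      = pvStamp ((List.range (pvNB seq0.length)).map (fun m => pvCnt seq0 (m + 1))) seq
          ((s, e), code) := by
  set counts := (List.range (pvNB seq0.length)).map (fun m => pvCnt seq0 (m + 1)) with hcounts
  have hclen : counts.length = pvNB seq0.length := by simp [hcounts]
  have hget : ∀ i, i < pvNB seq0.length → counts.getD i 0 = pvCnt seq0 (i + 1) := by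
    intro i hi
    rw [List.getD_eq_getElem counts 0 (by omega)]
    simp [hcounts]
  have hsort : counts.Pairwise (· ≤ ·) := by
    rw [hcounts, List.pairwise_map]
    exact (List.pairwise_lt_range).imp (fun h => pvCnt_mono seq0 (by omega))
  obtain ⟨hLa, hLb, hLc, hLd⟩ := pvBisectL_go counts s hsort counts.length 0 counts.length
    (by omega) (by omega) (le_refl _) (by omega) (by omega)
  obtain ⟨hRa, hRb, hRc, hRd⟩ := pvBisectR_go counts e hsort counts.length 0 counts.length
    (by omega) (by omega) (le_refl _) (by omega) (by omega)
  set lo := pvBisectL counts s 0 counts.length with hlo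
  set hi := pvBisectR counts e 0 counts.length with hhi
  have hchar : ∀ m, m < pvNB seq0.length →
      ((decide (s ≤ pvCnt seq0 (m + 1)) && decide (pvCnt seq0 (m + 1) ≤ e)) = true
        ↔ (lo ≤ m ∧ m < hi)) := by
    intro m hm
    simp only [Bool.and_eq_true, decide_eq_true_eq]
    constructor
    · rintro ⟨hs1, hs2⟩
      constructor
      · by_contra hcon
        have := hLc m (by omega)
        rw [hget m hm] at this
        omega
      · by_contra hcon
        have := hRd m (by omega) (by omega)
        rw [hget m hm] at this
        omega
    · rintro ⟨hm1, hm2⟩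
      have h1 := hLd m hm1 (by omega)
      have h2 := hRc m hm2
      rw [hget m hm] at h1 h2
      exact ⟨h1, h2⟩
  have hfilter : (List.range (pvNB seq0.length)).filter
      (fun m => decide (s ≤ pvCnt seq0 (m + 1)) && decide (pvCnt seq0 (m + 1) ≤ e))
      = List.range' lo (hi - lo) :=
    pv_filter_range_interval _ (pvNB seq0.length) lo hi (by omega) hchar
  have hstart := pvLoopA_spec_fuel code s e seq.length 0 seq (by omega)
  rw [pvCnt_zero] at hstart
  simp only [Nat.mul_zero] at hstart
  rw [hstart, pvSpecA_eq_fuel code s e seq.length 0 seq (by omega)]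
  have hpred : (fun m => decide (s ≤ pvCnt seq (m + 1)) && decide (pvCnt seq (m + 1) ≤ e))
      = (fun m => decide (s ≤ pvCnt seq0 (m + 1)) && decide (pvCnt seq0 (m + 1) ≤ e)) := by
    funext m; rw [hcnt]
  rw [hlen, hpred, Nat.sub_zero, show List.range' 0 (pvNB seq0.length) = List.range (pvNB seq0.length) from List.range_eq_range'.symm, hfilter]
  rfl

theorem pv_fold_eq (seq0 : List String) :
    ∀ (ps : List ((Int × Int) × String)) (seq : List String),
      seq.length = seq0.length → (∀ t, pvCnt seq t = pvCnt seq0 t) →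
      ps.foldl (fun sq p => pvLoopA p.2 p.1.1 p.1.2 sq 0 0) seq
        = ps.foldl
            (fun sq p =>
              pvStamp ((List.range (pvNB seq0.length)).map (fun m => pvCnt seq0 (m + 1))) sq p)
            seq := by
  intro ps
  induction ps with
  | nil => intro seq _ _; rfl
  | cons p ps ih =>
    intro seq hlen hcnt
    rw [List.foldl_cons, List.foldl_cons]
    have hstep : pvLoopA p.2 p.1.1 p.1.2 seq 0 0
        = pvStamp ((List.range (pvNB seq0.length)).map (fun m => pvCnt seq0 (m + 1))) seq p := by
      have := pv_perDomain seq0 seq p.2 p.1.1 p.1.2 hlen hcnt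
      simpa using this
    rw [hstep]
    apply ih
    · unfold pvStamp
      rw [pv_foldl_write_length, hlen]
    · intro t
      unfold pvStamp
      rw [pv_foldl_write_cnt, hcnt]

-- A's enumerate-and-index loop over the domains is the fold over the zipped pairs
theorem pv_foldA_zip :
    ∀ (ds : List (Int × Int)) (pre rest : List String) (seq : List String),
      ds.length ≤ rest.length →
      (PySem.List.enumerate ds (pre.length : Int)).foldl
        (fun sq p => pvLoopA (PySem.List.pyGetD (pre ++ rest) p.1 "") p.2.1 p.2.2 sq 0 0) seq
      = (ds.zip rest).foldl (fun sq p => pvLoopA p.2 p.1.1 p.1.2 sq 0 0) seq := by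
  intro ds
  induction ds with
  | nil => intro pre rest seq _; rfl
  | cons d ds ih =>
    intro pre rest seq hle
    cases rest with
    | nil => simp at hle
    | cons c rest' =>
      rw [PySem.List.enumerate_cons, List.foldl_cons]
      have hcode : PySem.List.pyGetD (pre ++ c :: rest') (pre.length : Int) "" = c := by
        rw [PySem.List.pyGetD_natCast]
        simp [List.getD]
      rw [hcode]
      have happ : pre ++ c :: rest' = (pre ++ [c]) ++ rest' := by simp
      have hlen1 : (pre.length : Int) + 1 = ((pre ++ [c]).length : Int) := by
        simp
      rw [happ, hlen1, ih (pre ++ [c]) rest' _ (by simpa using hle)]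
      rfl

-- ===== VERDICT (by name: the statement is the Claim_ definition above) =====
theorem encode_domains_spec : Claim_equal_encode_domains := by
  intro seq domains domain_codes hdom hpre
  unfold Spec_encode_domains
  obtain ⟨hlen, -⟩ := hpre
  have hA : encode_domains seq domains domain_codes
      = (domains.zip domain_codes).foldl (fun sq p => pvLoopA p.2 p.1.1 p.1.2 sq 0 0) seq := by
    unfold encode_domains
    have h := pv_foldA_zip domains ([] : List String) domain_codes seq hlen
    simpa using h
  have hB : encode_domains_alt seq domains domain_codes
      = (domains.zip domain_codes).foldl
          (fun sq p =>
            pvStamp ((List.range (pvNB seq.length)).map (fun m => pvCnt seq (m + 1))) sq p)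
          seq := by
    unfold encode_domains_alt
    rw [pvCountsGo_eq]
    rfl
  rw [hA, hB]
  exact pv_fold_eq seq (domains.zip domain_codes) seq rfl (fun t => rfl)
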